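-- pv_equiv track=rewrite | github.com/the-bokya/Advent-of-Code-2024 | 21/1_faster.py | dir_dir_move
-- ===== SOURCE A (Python) =====
-- dir_keypad = ["-^A", "<v>"]
--
-- def dir_dir_move(a, b):
--     si, sj = a
--     ei, ej = b
--     di, dj = ei - si, ej - sj
--     queue = [("", a)]
--     outs = []
--     if ei > si:
--         di = 1
--         v = "v"
--     elif ei == si:
--         di = 0
--     else:
--         di = -1
--         v = "^"
--
--     if ej > sj:
--         dj = 1
--         h = ">"
--     elif ej == sj:
--         dj = 0
--     else:
--         dj = -1
--         h = "<"
--     while queue: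
--         output, cs = queue.pop(0)
--         ci, cj = cs
--
--         if (ci, cj) == b:
--             outs.append(output)
--             continue
--         if dir_keypad[ci][cj] == "-":
--             continue
--         if ei != ci:
--             queue.append((output+v, (ci+di, cj)))
--         if ej != cj:
--             queue.append((output+h, (ci, cj+dj)))
--     return outs
-- ===== SOURCE B (Python) =====
-- dir_keypad = ["-^A", "<v>"]
--
-- def dir_dir_move(a, b):
--     si, sj = a
--     ei, ej = b
--     di = (ei > si) - (ei < si)
--     dj = (ej > sj) - (ej < sj)
--     v = "v" if di > 0 else "^"
--     h = ">" if dj > 0 else "<"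
--
--     def go(path, ci, cj):
--         if (ci, cj) == b:
--             return [path]
--         if dir_keypad[ci][cj] == "-":
--             return []
--         res = []
--         if ei != ci:
--             res += go(path + v, ci + di, cj)
--         if ej != cj:
--             res += go(path + h, ci, cj + dj)
--         return res
--
--     return go("", si, sj)
-- ===== Notes on version B (the rewrite author's own statement) =====
-- stated objective: simpler
-- what changed: Replaces A's explicit FIFO queue (while-loop with pop(0) and appends) by a direct recursive helper on the current cell, vertical branch before horizontal, whose DFS preorder equals A's BFS order because all complete paths have equal length.
-- outside the precondition, e.g. on dir_dir_move((0, 1), (2, 1)): A returns ['vv'], B returns ['vv']; on dir_dir_move((1, 2), (1, 3)): A returns ['>'], B returns ['>']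
import Mathlib
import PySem

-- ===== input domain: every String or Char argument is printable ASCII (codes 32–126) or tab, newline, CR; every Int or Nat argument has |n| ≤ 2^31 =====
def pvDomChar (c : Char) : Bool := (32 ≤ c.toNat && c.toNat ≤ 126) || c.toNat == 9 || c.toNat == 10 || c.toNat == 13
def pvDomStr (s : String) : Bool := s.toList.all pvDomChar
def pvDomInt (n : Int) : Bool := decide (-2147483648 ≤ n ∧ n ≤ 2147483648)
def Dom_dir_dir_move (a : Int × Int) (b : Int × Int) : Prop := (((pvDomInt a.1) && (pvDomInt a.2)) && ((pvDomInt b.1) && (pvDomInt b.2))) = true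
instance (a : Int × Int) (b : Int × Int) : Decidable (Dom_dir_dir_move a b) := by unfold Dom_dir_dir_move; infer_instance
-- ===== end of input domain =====

-- B replaces A's explicit FIFO queue with a direct recursion on the current cell
-- (vertical branch first, then horizontal), which yields the same list in the same
-- order; equivalence is claimed on the keypad grid plus the trivial a = b case.

-- ===== PORT A =====
def dirKeypad : List String := ["-^A", "<v>"]

-- dir_keypad[ci][cj], with Python index semantics; none = IndexError (outside Pre_)
def keyAt (ci cj : Int) : Option Char :=
  (PySem.List.pyGet? dirKeypad ci).bind (fun row => PySem.Str.pyGet? row cj)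

-- A's while-loop over the queue; fuel bounds the number of iterations (on Pre_ inputs
-- the loop pops at most a few dozen elements, far below the fuel given below).
def loopA (b : Int × Int) (ei ej di dj : Int) (v h : String) :
    Nat → List (String × (Int × Int)) → List String → List String
  | _, [], outs => outs
  | 0, _ :: _, outs => outs   -- fuel exhausted: unreachable on Pre_ inputs
  | Nat.succ n, (output, cs) :: rest, outs =>
      let ci := cs.1
      let cj := cs.2
      if (ci, cj) = b then
        loopA b ei ej di dj v h n rest (outs ++ [output])
      else if keyAt ci cj = some '-' then
        loopA b ei ej di dj v h n rest outs
      else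
        let q1 := if ei ≠ ci then rest ++ [(output ++ v, (ci + di, cj))] else rest
        let q2 := if ej ≠ cj then q1 ++ [(output ++ h, (ci, cj + dj))] else q1
        loopA b ei ej di dj v h n q2 outs
      -- (on a `none` index, i.e. a Python IndexError, this port falls through the
      --  '-' test and keeps walking; such inputs are excluded by Pre_)

def dir_dir_move (a : Int × Int) (b : Int × Int) : List String :=
  let si := a.1; let sj := a.2
  let ei := b.1; let ej := b.2
  -- Python leaves v (resp. h) unbound in the `==` branch; it is never used there,
  -- so the port supplies a dummy value in that branch.
  let dv : Int × String := if ei > si then (1, "v") else if ei = si then (0, "v") else (-1, "^")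
  let dh : Int × String := if ej > sj then (1, ">") else if ej = sj then (0, ">") else (-1, "<")
  loopA b ei ej dv.1 dh.1 dv.2 dh.2 1000 [("", a)] []

-- ===== PORT B =====
-- B's recursive helper go(path, ci, cj); fuel bounds the recursion depth (≤ 4 on Pre_ inputs).
def goB (b : Int × Int) (ei ej di dj : Int) (v h : String) :
    Nat → String → Int → Int → List String
  | 0, _, _, _ => []   -- fuel exhausted: unreachable on Pre_ inputs
  | Nat.succ n, path, ci, cj =>
      if (ci, cj) = b then [path]
      else if keyAt ci cj = some '-' then []
      else
        (if ei ≠ ci then goB b ei ej di dj v h n (path ++ v) (ci + di) cj else []) ++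
        (if ej ≠ cj then goB b ei ej di dj v h n (path ++ h) ci (cj + dj) else [])

def dir_dir_move_alt (a : Int × Int) (b : Int × Int) : List String :=
  let si := a.1; let sj := a.2
  let ei := b.1; let ej := b.2
  let di : Int := (if ei > si then 1 else 0) - (if ei < si then 1 else 0)
  let dj : Int := (if ej > sj then 1 else 0) - (if ej < sj then 1 else 0)
  let v : String := if di > 0 then "v" else "^"
  let h : String := if dj > 0 then ">" else "<"
  goB b ei ej di dj v h 1000 "" si sj

-- ===== PRECONDITION & SPEC =====
-- Pre_ admits every position pair that Python's (possibly negative, wrapping) indexing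
-- of the 2×3 keypad accepts along the whole walk, i.e. both cells in [-2,1] × [-3,2],
-- plus the trivial a = b case (A returns [""] without touching the keypad). Outside it
-- A usually raises IndexError; on a few inputs with b just outside that box A still
-- returns (the target cell itself is never indexed) — B behaves identically there, but
-- those values are artefacts of Python indexing, outside the keypad's domain.
def Pre_dir_dir_move (a : Int × Int) (b : Int × Int) : Prop :=
  a = b ∨ (-2 ≤ a.1 ∧ a.1 ≤ 1 ∧ -3 ≤ a.2 ∧ a.2 ≤ 2 ∧ -2 ≤ b.1 ∧ b.1 ≤ 1 ∧ -3 ≤ b.2 ∧ b.2 ≤ 2)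
instance (a : Int × Int) (b : Int × Int) : Decidable (Pre_dir_dir_move a b) := by
  unfold Pre_dir_dir_move; infer_instance

def pvWitness_dir_dir_move : (Int × Int) × (Int × Int) := ((1, 0), (0, 2))

def Spec_dir_dir_move (a : Int × Int) (b : Int × Int) (out : List String) : Prop := out = dir_dir_move_alt a b
instance (a : Int × Int) (b : Int × Int) (out : List String) : Decidable (Spec_dir_dir_move a b out) := by unfold Spec_dir_dir_move; infer_instance

-- ===== CLAIM (what is proved, stated in full; the proofs are below) =====
def Claim_equal_dir_dir_move : Prop := ∀ (a : Int × Int) (b : Int × Int), Dom_dir_dir_move a b → Pre_dir_dir_move a b → Spec_dir_dir_move a b (dir_dir_move a b)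

-- ===== LEMMAS AND PROOFS =====

-- when a = b both programs return [""] immediately
theorem eq_case (b : Int × Int) : dir_dir_move b b = dir_dir_move_alt b b := by
  simp [dir_dir_move, dir_dir_move_alt, loopA, goB]

-- on the indexable box the claim is a finite check
theorem grid_case : ∀ a1 ∈ Finset.Icc (-2 : Int) 1, ∀ a2 ∈ Finset.Icc (-3 : Int) 2,
    ∀ b1 ∈ Finset.Icc (-2 : Int) 1, ∀ b2 ∈ Finset.Icc (-3 : Int) 2,
    dir_dir_move (a1, a2) (b1, b2) = dir_dir_move_alt (a1, a2) (b1, b2) := by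
  decide

-- ===== VERDICT (by name: the statement is the Claim_ definition above) =====
theorem dir_dir_move_spec : Claim_equal_dir_dir_move := by
  intro a b _ hpre
  unfold Spec_dir_dir_move
  rcases hpre with rfl | ⟨h1, h2, h3, h4, h5, h6, h7, h8⟩
  · exact eq_case a
  · obtain ⟨a1, a2⟩ := a
    obtain ⟨b1, b2⟩ := b
    exact grid_case a1 (by simpa using ⟨h1, h2⟩) a2 (by simpa using ⟨h3, h4⟩)
      b1 (by simpa using ⟨h5, h6⟩) b2 (by simpa using ⟨h7, h8⟩)
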